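-- pv_equiv track=rewrite | github.com/MuslimMujahid/CNN-forward-propagation | LEMBUT/util.py | get_tp_fp_tn_fn
-- ===== SOURCE A (Python) =====
-- def get_tp_fp_tn_fn(y_actual, y_pred):
--     TP = []
--     FP = []
--     TN = []
--     FN = []
--
--     for positive in (list(set(y_actual))):
--         TP_temp = 0
--         FP_temp = 0
--         TN_temp = 0
--         FN_temp = 0
--         for i in range(len(y_pred)):
--             if y_actual[i]==y_pred[i]==positive:
--                 TP_temp += 1
--             if y_pred[i]==positive and y_actual[i]!=positive:
--                 FP_temp += 1
--             if y_pred[i]!=positive and y_actual[i]!=positive: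
--                 TN_temp += 1
--             if y_pred[i]!=positive and y_actual[i]==positive:
--                 FN_temp += 1
--
--         TP.append(TP_temp)
--         FP.append(FP_temp)
--         TN.append(TN_temp)
--         FN.append(FN_temp)
--
--     return(TP, FP, TN, FN)
-- ===== SOURCE B (Python) =====
-- def get_tp_fp_tn_fn(y_actual, y_pred):
--     actual_count = {}
--     pred_count = {}
--     correct = {}
--     for a, p in zip(y_actual, y_pred):
--         actual_count[a] = actual_count.get(a, 0) + 1
--         pred_count[p] = pred_count.get(p, 0) + 1
--         if a == p:
--             correct[a] = correct.get(a, 0) + 1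
--     classes = list(set(y_actual))
--     n = len(y_pred)
--     TP = [correct.get(c, 0) for c in classes]
--     FP = [pred_count.get(c, 0) - t for c, t in zip(classes, TP)]
--     FN = [actual_count.get(c, 0) - t for c, t in zip(classes, TP)]
--     TN = [n - t - f - m for (t, f), m in zip(zip(TP, FP), FN)]
--     return (TP, FP, TN, FN)
-- ===== Notes on version B (the rewrite author's own statement) =====
-- stated objective: faster
-- what changed: Replaces the nested loop (for each class, rescan all n predictions with four ifs) by one zip pass building actual/pred/correct count dicts, then per class TP=correct[c], FP/FN by subtraction and TN=n-TP-FP-FN via list comprehensions.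
import Mathlib
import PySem

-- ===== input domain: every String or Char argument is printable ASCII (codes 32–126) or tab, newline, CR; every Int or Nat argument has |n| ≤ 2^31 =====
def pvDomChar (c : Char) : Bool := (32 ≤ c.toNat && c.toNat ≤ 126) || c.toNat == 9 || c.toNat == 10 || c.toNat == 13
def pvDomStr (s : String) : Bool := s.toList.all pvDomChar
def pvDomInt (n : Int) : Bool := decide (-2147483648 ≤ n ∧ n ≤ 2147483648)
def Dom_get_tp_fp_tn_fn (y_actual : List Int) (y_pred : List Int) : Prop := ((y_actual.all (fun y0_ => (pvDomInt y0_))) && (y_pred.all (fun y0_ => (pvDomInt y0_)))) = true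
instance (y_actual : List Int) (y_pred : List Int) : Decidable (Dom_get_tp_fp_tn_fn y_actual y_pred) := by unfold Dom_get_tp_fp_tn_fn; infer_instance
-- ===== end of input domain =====

-- B replaces A's per-class rescan of all predictions (nested loop) by one zip pass building three
-- count dicts, then per-class subtraction; return value only, neither version mutates its arguments.
--
-- SHARED HELPER: both Pythons call the builtin list(set(y_actual)) on ints, whose ORDER is CPython's
-- hash-table iteration order (PySem.Set deliberately does not model it).  pySetList below
-- transliterates CPython's setobject.c for int keys — open addressing, 9 linear probes then the
-- 5*i+1+perturb LCG, growth at fill*5 >= mask*3 — exactly (hash(n) = n for |n| < 2^61 - 1 except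
-- hash(-1) = -2, so pyHashIntSmall is exact on Dom's |n| ≤ 2^31).  Both ports use it for their
-- 'list(set(y_actual))' step, like a PySem primitive; it plays no role in the equivalence proof.
-- (set_insert_clean, used on rebuild after a resize, probes like set_add_entry but without equality
-- checks; since a rebuilt key is never already present, pvFindAdd's equality arm never fires there,
-- so one probe loop serves both.)

-- CPython hash of an int, exact for |n| < 2^61 - 1 (Dom bounds |n| ≤ 2^31)
def pyHashIntSmall (n : Int) : Int := if n = -1 then -2 else n

-- two's-complement 64-bit view of a signed hash (used as probe start and perturb)
def pvU64 (h : Int) : Nat := (h % (2 ^ 64)).toNat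

-- scan cnt slots from i: some (some s) = first unused slot, some none = key found active, none = window exhausted
def pvScanAdd (table : List (Option Int)) (key h : Int) : Nat → Nat → Option (Option Nat)
  | _, 0 => none
  | i, c + 1 =>
    match table.getD i none with
    | none => some (some i)
    | some k => if pyHashIntSmall k = h ∧ k = key then some none else pvScanAdd table key h (i + 1) c

-- set_add_entry's probe loop; fuel is generous (perturb dies after ≤13 shifts, then the LCG is full-period)
def pvFindAdd (table : List (Option Int)) (mask : Nat) (key h : Int) : Nat → Nat → Nat → Option Nat
  | _, _, 0 => some 0
  | perturb, i, f + 1 =>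
    let probes := if i + 9 ≤ mask then 9 else 0
    match pvScanAdd table key h i (probes + 1) with
    | some r => r
    | none =>
      let p := perturb >>> 5
      pvFindAdd table mask key h p ((i * 5 + 1 + p) &&& mask) f

-- set_insert_clean (rebuild after a resize); key absent, so the equality arm of pvScanAdd never fires
def pvInsClean (table : List (Option Int)) (mask : Nat) (key : Int) : List (Option Int) :=
  let h := pyHashIntSmall key
  let hu := pvU64 h
  match pvFindAdd table mask key h hu (hu &&& mask) (mask + 32) with
  | some s => table.set s (some key)
  | none => table

-- newsize = 8; while newsize <= minused: newsize <<= 1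
def pvNewSize : Nat → Nat → Nat → Nat
  | _, s, 0 => s
  | m, s, f + 1 => if s ≤ m then pvNewSize m (s * 2) f else s

-- set.add(key): probe, insert, and resize when fill*5 >= mask*3 (minused = used*4, or *2 past 50000)
def pvSetAdd (st : List (Option Int) × Nat) (key : Int) : List (Option Int) × Nat :=
  let (table, fill) := st
  let mask := table.length - 1
  let h := pyHashIntSmall key
  let hu := pvU64 h
  match pvFindAdd table mask key h hu (hu &&& mask) (mask + 32) with
  | none => (table, fill)
  | some s =>
    let table' := table.set s (some key)
    let fill' := fill + 1
    if fill' * 5 < mask * 3 then (table', fill')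
    else
      let minused := if fill' > 50000 then fill' * 2 else fill' * 4
      let newsize := pvNewSize minused 8 64
      (table'.foldl
        (fun nt e => match e with
          | none => nt
          | some k => pvInsClean nt (newsize - 1) k)
        (List.replicate newsize (none : Option Int)), fill')

-- list(set(xs)) for ints: build the table, read it in slot order
def pySetList (xs : List Int) : List Int :=
  ((xs.foldl pvSetAdd (List.replicate 8 (none : Option Int), 0)).1).filterMap id

-- ===== PORT A =====
def get_tp_fp_tn_fn (y_actual : List Int) (y_pred : List Int) : List Int × List Int × List Int × List Int :=
  (pySetList y_actual).foldl
    (fun (acc : List Int × List Int × List Int × List Int) positive =>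
      let t := (PySem.List.pyRange 0 (y_pred.length : Int)).foldl
        (fun (t : Int × Int × Int × Int) i =>
          let a := PySem.List.pyGetD y_actual i 0   -- y_actual[i]; in range on Pre_
          let p := PySem.List.pyGetD y_pred i 0     -- y_pred[i]; always in range
          let tp := if a = p ∧ p = positive then t.1 + 1 else t.1
          let fp := if p = positive ∧ ¬a = positive then t.2.1 + 1 else t.2.1
          let tn := if ¬p = positive ∧ ¬a = positive then t.2.2.1 + 1 else t.2.2.1
          let fn := if ¬p = positive ∧ a = positive then t.2.2.2 + 1 else t.2.2.2
          (tp, fp, tn, fn))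
        ((0 : Int), (0 : Int), (0 : Int), (0 : Int))
      (acc.1 ++ [t.1], acc.2.1 ++ [t.2.1], acc.2.2.1 ++ [t.2.2.1], acc.2.2.2 ++ [t.2.2.2]))
    (([], [], [], []) : List Int × List Int × List Int × List Int)

-- ===== PORT B =====
-- dict[k] = dict.get(k, 0) + 1
def pvBump (d : PySem.Dict Int Int) (k : Int) : PySem.Dict Int Int := d.modify k 0 (fun x => x + 1)

-- the 'for a, p in zip(y_actual, y_pred)' counting loop of Source B, as structural recursion on the zip
def pvTally : List (Int × Int) → PySem.Dict Int Int → PySem.Dict Int Int → PySem.Dict Int Int →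
    PySem.Dict Int Int × PySem.Dict Int Int × PySem.Dict Int Int
  | [], ac, pc, cr => (ac, pc, cr)
  | (a, p) :: rest, ac, pc, cr =>
    pvTally rest (pvBump ac a) (pvBump pc p) (if a = p then pvBump cr a else cr)

def get_tp_fp_tn_fn_alt (y_actual : List Int) (y_pred : List Int) : List Int × List Int × List Int × List Int :=
  let st := pvTally (y_actual.zip y_pred) PySem.Dict.empty PySem.Dict.empty PySem.Dict.empty
  let classes := pySetList y_actual
  let n : Int := (y_pred.length : Int)
  let TP := classes.map (fun c => st.2.2.getD c 0)
  let FP := (classes.zip TP).map (fun ct => st.2.1.getD ct.1 0 - ct.2)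
  let FN := (classes.zip TP).map (fun ct => st.1.getD ct.1 0 - ct.2)
  let TN := ((TP.zip FP).zip FN).map (fun v => n - v.1.1 - v.1.2 - v.2)
  (TP, FP, TN, FN)

-- ===== PRECONDITION & SPEC =====
-- Pre_ excludes the inputs on which A raises IndexError: a nonempty y_actual shorter than y_pred
-- (A indexes y_actual[i] for every i < len(y_pred); with y_actual empty its loops never run).
def Pre_get_tp_fp_tn_fn (y_actual : List Int) (y_pred : List Int) : Prop :=
  y_actual = [] ∨ y_pred.length ≤ y_actual.length
instance (y_actual : List Int) (y_pred : List Int) : Decidable (Pre_get_tp_fp_tn_fn y_actual y_pred) := by unfold Pre_get_tp_fp_tn_fn; infer_instance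
def pvWitness_get_tp_fp_tn_fn : List Int × List Int := ([1, 0, 2, 1], [1, 1, 2])
def Spec_get_tp_fp_tn_fn (y_actual : List Int) (y_pred : List Int) (out : List Int × List Int × List Int × List Int) : Prop := out = get_tp_fp_tn_fn_alt y_actual y_pred
instance (y_actual : List Int) (y_pred : List Int) (out : List Int × List Int × List Int × List Int) : Decidable (Spec_get_tp_fp_tn_fn y_actual y_pred out) := by unfold Spec_get_tp_fp_tn_fn; infer_instance

-- ===== CLAIM (what is proved, stated in full; the proofs are below) =====
def Claim_equal_get_tp_fp_tn_fn : Prop := ∀ (y_actual : List Int) (y_pred : List Int), Dom_get_tp_fp_tn_fn y_actual y_pred → Pre_get_tp_fp_tn_fn y_actual y_pred → Spec_get_tp_fp_tn_fn y_actual y_pred (get_tp_fp_tn_fn y_actual y_pred)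

-- ===== LEMMAS AND PROOFS =====

lemma pv_zip_self_map {α β : Type} (l : List α) (f : α → β) :
    l.zip (l.map f) = l.map (fun x => (x, f x)) := by
  induction l with
  | nil => rfl
  | cons x l ih => simp [ih]

lemma pv_zip_map_map {α β γ : Type} (l : List α) (f : α → β) (g : α → γ) :
    (l.map f).zip (l.map g) = l.map (fun x => (f x, g x)) := by
  induction l with
  | nil => rfl
  | cons x l ih => simp [ih]

lemma pv_zip_eq_range (ya yp : List Int) (h : yp.length ≤ ya.length) :
    ya.zip yp = (List.range yp.length).map (fun j => (ya.getD j 0, yp.getD j 0)) := by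
  apply List.ext_getElem
  · simp; omega
  · intro i h1 h2
    have hi : i < yp.length := by simp at h1; omega
    have hia : i < ya.length := by omega
    simp [List.getElem_zip, List.getD, hi, hia]

lemma pv_tally (a p : Nat → Int) (l : List Nat) (ac pc cr : PySem.Dict Int Int) :
    pvTally (l.map fun j => (a j, p j)) ac pc cr
    = ((l.map a).foldl (fun d k => d.modify k 0 (fun x => x + 1)) ac,
       (l.map p).foldl (fun d k => d.modify k 0 (fun x => x + 1)) pc,
       ((l.filter fun j => a j == p j).map a).foldl (fun d k => d.modify k 0 (fun x => x + 1)) cr) := by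
  induction l generalizing ac pc cr with
  | nil => rfl
  | cons j l ih => by_cases h : a j = p j <;> simp [pvTally, pvBump, h, ih]

lemma pv_foldl4 (g1 g2 g3 g4 : Int → Int) (cs : List Int) (A B C D : List Int) :
    cs.foldl (fun (acc : List Int × List Int × List Int × List Int) c =>
        (acc.1 ++ [g1 c], acc.2.1 ++ [g2 c], acc.2.2.1 ++ [g3 c], acc.2.2.2 ++ [g4 c])) (A, B, C, D)
    = (A ++ cs.map g1, B ++ cs.map g2, C ++ cs.map g3, D ++ cs.map g4) := by
  induction cs generalizing A B C D with
  | nil => simp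
  | cons c cs ih => simp [ih]

lemma pv_innerA (a p : Nat → Int) (c : Int) (l : List Nat) (tp fp tn fn : Int) :
    l.foldl (fun (t : Int × Int × Int × Int) j =>
      (if a j = p j ∧ p j = c then t.1 + 1 else t.1,
       if p j = c ∧ ¬a j = c then t.2.1 + 1 else t.2.1,
       if ¬p j = c ∧ ¬a j = c then t.2.2.1 + 1 else t.2.2.1,
       if ¬p j = c ∧ a j = c then t.2.2.2 + 1 else t.2.2.2)) (tp, fp, tn, fn)
    = (tp + ((l.countP fun j => decide (a j = p j ∧ p j = c) : Nat) : Int),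
       fp + ((l.countP fun j => decide (p j = c ∧ ¬a j = c) : Nat) : Int),
       tn + ((l.countP fun j => decide (¬p j = c ∧ ¬a j = c) : Nat) : Int),
       fn + ((l.countP fun j => decide (¬p j = c ∧ a j = c) : Nat) : Int)) := by
  induction l generalizing tp fp tn fn with
  | nil => simp
  | cons j l ih =>
    simp only [List.foldl_cons, List.countP_cons, ih]
    refine Prod.ext ?_ (Prod.ext ?_ (Prod.ext ?_ ?_)) <;> simp <;> split_ifs <;> omega

lemma pv_counts (a p : Nat → Int) (c : Int) (l : List Nat) :
    (l.countP fun j => p j == c)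
      = (l.countP fun j => decide (a j = p j ∧ p j = c)) + (l.countP fun j => decide (p j = c ∧ ¬a j = c)) ∧
    (l.countP fun j => a j == c)
      = (l.countP fun j => decide (a j = p j ∧ p j = c)) + (l.countP fun j => decide (¬p j = c ∧ a j = c)) ∧
    (l.countP fun j => (a j == c) && (a j == p j))
      = (l.countP fun j => decide (a j = p j ∧ p j = c)) ∧
    l.length = (l.countP fun j => decide (a j = p j ∧ p j = c)) + (l.countP fun j => decide (p j = c ∧ ¬a j = c))
      + (l.countP fun j => decide (¬p j = c ∧ ¬a j = c)) + (l.countP fun j => decide (¬p j = c ∧ a j = c)) := by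
  induction l with
  | nil => simp
  | cons j l ih =>
    obtain ⟨h1, h2, h3, h4⟩ := ih
    simp only [List.countP_cons, List.length_cons, h1, h2, h3, h4]
    by_cases e1 : a j = p j <;> by_cases e2 : p j = c <;> by_cases e3 : a j = c <;>
      simp [e1, e2, e3] <;> omega

-- ===== VERDICT (by name: the statement is the Claim_ definition above) =====
theorem get_tp_fp_tn_fn_spec : Claim_equal_get_tp_fp_tn_fn := by
  intro ya yp _ hpre
  unfold Spec_get_tp_fp_tn_fn get_tp_fp_tn_fn get_tp_fp_tn_fn_alt
  rcases hpre with h0 | hpre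
  · subst h0
    have hs : pySetList ([] : List Int) = [] := by decide
    simp [hs]
  · simp only [PySem.List.pyRange_zero_natCast, List.foldl_map, PySem.List.pyGetD_natCast]
    rw [pv_zip_eq_range ya yp hpre,
        pv_tally (fun j => ya.getD j 0) (fun j => yp.getD j 0)]
    simp only [pv_zip_self_map, pv_zip_map_map, List.map_map, Function.comp_def]
    rw [pv_foldl4]
    simp only [List.nil_append]
    refine Prod.ext ?_ (Prod.ext ?_ (Prod.ext ?_ ?_)) <;>
      refine List.map_congr_left (fun c hc => ?_) <;>
      · rw [pv_innerA (fun j => ya.getD j 0) (fun j => yp.getD j 0) c]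
        simp only [PySem.Dict.getD_foldl_modify_add_one, List.count_eq_countP, List.countP_map,
          List.countP_filter, Function.comp]
        obtain ⟨h1, h2, h3, h4⟩ := pv_counts (fun j => ya.getD j 0) (fun j => yp.getD j 0) c (List.range yp.length)
        have e0 : (PySem.Dict.empty : PySem.Dict Int Int).getD c 0 = (0 : Int) := rfl
        simp only [e0, zero_add, Function.comp_def, List.length_range] at h1 h2 h3 h4 ⊢
        omega
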